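-- pv_equiv track=rewrite | github.com/xudegloss/CodingTest | python/수원대 데이터마이닝/중간고사 프로그래머스 Lv.1/18음양 더하기.py | solution
-- ===== SOURCE A (Python) =====
-- def solution(absolutes, signs):
--     answer = 0
--     for idx in range(0, len(absolutes)):
--         if signs[idx]==True:
--             answer+=absolutes[idx]
--         else:
--             answer-=absolutes[idx]
--     return answer
-- ===== SOURCE B (Python) =====
-- def solution(absolutes, signs):
--     total = sum(absolutes)
--     neg = sum(a for a, s in zip(absolutes, signs) if s != True)
--     return total - 2 * neg
-- ===== Notes on version B (the rewrite author's own statement) =====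
-- stated objective: alternative
-- what changed: Replaces A's per-index conditional add/subtract loop with one full sum of absolutes plus a correction term (total - 2*sum of negative-signed entries) computed over zip(absolutes, signs).
import Mathlib
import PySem

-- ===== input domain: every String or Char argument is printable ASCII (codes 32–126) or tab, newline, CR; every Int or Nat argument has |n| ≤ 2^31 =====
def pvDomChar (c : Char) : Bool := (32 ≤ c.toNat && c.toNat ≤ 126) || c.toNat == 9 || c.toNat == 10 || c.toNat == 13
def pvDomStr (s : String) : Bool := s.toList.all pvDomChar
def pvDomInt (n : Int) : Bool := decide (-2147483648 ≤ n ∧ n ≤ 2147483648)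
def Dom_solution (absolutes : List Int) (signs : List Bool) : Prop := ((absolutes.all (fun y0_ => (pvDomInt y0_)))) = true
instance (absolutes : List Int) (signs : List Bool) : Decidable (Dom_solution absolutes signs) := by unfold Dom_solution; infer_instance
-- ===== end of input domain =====

-- B computes the same signed sum as total - 2 * (sum of negative-signed entries) over zip, instead of A's
-- per-index conditional accumulation (objective: alternative, same cost).

-- ===== PORT A =====
-- A: answer = 0; for idx in range(0, len(absolutes)): if signs[idx]==True: answer += absolutes[idx] else: answer -= absolutes[idx]
-- signs[idx] / absolutes[idx] raise IndexError when signs is shorter than absolutes; Pre_ excludes that,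
-- so pyGetD with an arbitrary default is exact on Pre_.
def solution (absolutes : List Int) (signs : List Bool) : Int :=
  (PySem.List.pyRange 0 (absolutes.length : Int) 1).foldl
    (fun answer idx =>
      if PySem.List.pyGetD signs idx false == true then
        answer + PySem.List.pyGetD absolutes idx 0
      else
        answer - PySem.List.pyGetD absolutes idx 0) 0

-- ===== PORT B =====
-- B: total = sum(absolutes); neg = sum(a for a, s in zip(absolutes, signs) if s != True); return total - 2*neg
def solution_alt (absolutes : List Int) (signs : List Bool) : Int :=
  let total := absolutes.sum
  let neg := (((absolutes.zip signs).filter (fun p => p.2 != true)).map Prod.fst).sum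
  total - 2 * neg

-- ===== PRECONDITION & SPEC =====
-- A indexes signs[idx] for every idx < len(absolutes): it raises IndexError when signs is shorter.
def Pre_solution (absolutes : List Int) (signs : List Bool) : Prop :=
  absolutes.length ≤ signs.length
instance (absolutes : List Int) (signs : List Bool) : Decidable (Pre_solution absolutes signs) := by
  unfold Pre_solution; infer_instance

def pvWitness_solution : List Int × List Bool := ([4, 7, 12], [true, false, true])

def Spec_solution (absolutes : List Int) (signs : List Bool) (out : Int) : Prop := out = solution_alt absolutes signs
instance (absolutes : List Int) (signs : List Bool) (out : Int) : Decidable (Spec_solution absolutes signs out) := by unfold Spec_solution; infer_instance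

-- ===== CLAIM (what is proved, stated in full; the proofs are below) =====
def Claim_equal_solution : Prop := ∀ (absolutes : List Int) (signs : List Bool), Dom_solution absolutes signs → Pre_solution absolutes signs → Spec_solution absolutes signs (solution absolutes signs)

-- ===== LEMMAS AND PROOFS =====

-- Signed zip-sum: the value both programs compute, as a structural recursion (proof helper only).
def zsum : List Int → List Bool → Int → Int
  | [], _, acc => acc
  | _ :: _, [], acc => acc
  | a :: as, s :: ss, acc => zsum as ss (if s then acc + a else acc - a)

-- A's index loop over a common prefix of length p equals zsum over the suffixes.
lemma solution_fold_eq_zsum :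
    ∀ (as : List Int) (ss : List Bool) (p : List Int) (q : List Bool) (acc : Int),
      p.length = q.length → as.length ≤ ss.length →
      (PySem.List.pyRange (p.length : Int) (((p ++ as).length : Nat) : Int) 1).foldl
        (fun answer idx =>
          if PySem.List.pyGetD (q ++ ss) idx false == true then
            answer + PySem.List.pyGetD (p ++ as) idx 0
          else
            answer - PySem.List.pyGetD (p ++ as) idx 0) acc
      = zsum as ss acc := by
  intro as
  induction as with
  | nil =>
    intro ss p q acc _ _
    rw [PySem.List.pyRange_one_eq_nil (by simp)]
    simp [zsum]
  | cons a as ih =>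
    intro ss p q acc hpq hlen
    cases ss with
    | nil => simp at hlen
    | cons s ss =>
      rw [PySem.List.pyRange_one_cons (by simp [List.length_append])]
      simp only [List.foldl_cons]
      have hget : PySem.List.pyGetD (p ++ a :: as) (p.length : Int) 0 = a := by
        rw [PySem.List.pyGetD_natCast]
        simp [List.getD]
      have hgetq : PySem.List.pyGetD (q ++ s :: ss) (p.length : Int) false = s := by
        rw [hpq, PySem.List.pyGetD_natCast]
        simp [List.getD]
      rw [hget, hgetq]
      simp only [zsum]
      have key := ih ss (p ++ [a]) (q ++ [s]) (if s then acc + a else acc - a)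
        (by simp [hpq]) (by simpa using hlen)
      simp only [List.append_assoc, List.singleton_append, List.length_append,
        List.length_cons, List.length_nil] at key ⊢
      push_cast at key ⊢
      cases s <;> simpa using key

-- B's total-minus-twice-negatives equals zsum.
lemma alt_eq_zsum :
    ∀ (as : List Int) (ss : List Bool) (acc : Int), as.length ≤ ss.length →
      acc + as.sum - 2 * (((as.zip ss).filter (fun p => p.2 != true)).map Prod.fst).sum
      = zsum as ss acc := by
  intro as
  induction as with
  | nil => intro ss acc _; simp [zsum]
  | cons a as ih =>
    intro ss acc hlen
    cases ss with
    | nil => simp at hlen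
    | cons s ss =>
      cases s
      · have h := ih ss (acc - a) (by simpa using hlen)
        simp only [List.zip_cons_cons, List.filter_cons, zsum]
        simp only [bne_iff_ne, ne_eq, Bool.false_eq_true, not_false_eq_true,
          if_true, List.map_cons, List.sum_cons, ite_false]
        rw [← h]; ring
      · have h := ih ss (acc + a) (by simpa using hlen)
        simp only [List.zip_cons_cons, List.filter_cons, zsum]
        simp only [bne_iff_ne, ne_eq, not_true_eq_false, if_false, List.sum_cons, ite_true]
        rw [← h]; ring

-- ===== VERDICT (by name: the statement is the Claim_ definition above) =====
theorem solution_spec : Claim_equal_solution := by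
  intro absolutes signs _ hpre
  unfold Spec_solution solution solution_alt
  have hA := solution_fold_eq_zsum absolutes signs [] [] 0 rfl hpre
  simp only [List.nil_append, List.length_nil, Nat.cast_zero] at hA
  rw [hA, ← alt_eq_zsum absolutes signs 0 hpre]
  ring_nf
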